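-- pv_equiv track=rewrite | github.com/graphcore/poprithms | poprithms/notes/schedule/shift/shift_util.py | getLivenessPoints
-- ===== SOURCE A (Python) =====
-- def getLivenessPoints(liveness):
--     """
--     histogram points for the liveness plot. It will be used for a plot like:
--
--      ^
--      |       *
--      |   * * *
--      |  ** ***
--      | *********
--      +-------------->
--       schedule index.
--
--
--     For example, if the livenesses are [3,5], the points will be,
--     [[0,3],[1,3],[1,5],[2,5]]
--
--     The points are connected alternatively with horizontal and vertical lines.
--     """
--     xs = []
--     ys = []
--     for op in range(len(liveness)):
--         if op == 0:
--             xs.append(0)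
--         else:
--             xs.append(xs[-1])
--
--         xs.append(xs[-1] + 1)
--         ys.append(liveness[op])
--         ys.append(liveness[op])
--
--     assert len(xs) == len(ys)
--     assert len(xs) == 2 * len(liveness)
--
--     return xs, ys
-- ===== SOURCE B (Python) =====
-- def getLivenessPoints(liveness):
--     n = len(liveness)
--     xs = [(i + 1) // 2 for i in range(2 * n)]
--     ys = [liveness[i // 2] for i in range(2 * n)]
--     return xs, ys
-- ===== Notes on version B (the rewrite author's own statement) =====
-- stated objective: simpler
-- what changed: Replaces the stateful staircase loop (appending based on xs[-1]) with two index comprehensions computing each point directly by arithmetic: xs[i]=(i+1)//2 and ys[i]=liveness[i//2].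
import Mathlib
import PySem

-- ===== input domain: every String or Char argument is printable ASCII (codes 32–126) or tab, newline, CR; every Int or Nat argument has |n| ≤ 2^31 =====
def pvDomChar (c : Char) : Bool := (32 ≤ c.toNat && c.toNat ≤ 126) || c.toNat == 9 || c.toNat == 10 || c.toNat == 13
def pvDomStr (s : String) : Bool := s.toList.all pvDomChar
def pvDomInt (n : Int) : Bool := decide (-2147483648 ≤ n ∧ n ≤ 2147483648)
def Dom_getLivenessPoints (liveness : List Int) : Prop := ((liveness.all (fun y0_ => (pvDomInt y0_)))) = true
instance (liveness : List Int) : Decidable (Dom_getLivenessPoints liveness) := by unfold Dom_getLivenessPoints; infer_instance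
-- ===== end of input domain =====

-- B replaces A's stateful staircase loop (xs[-1] accumulation) with direct per-index
-- arithmetic comprehensions; objective: simpler.

-- ===== PORT A =====
-- loop body of A; xs[-1] accesses use pyGet? with .getD 0, exact since that list is
-- always nonempty at those program points (an element was just appended).
def pvStepA (liveness : List Int) (st : List Int × List Int) (op : Int) : List Int × List Int :=
  let xs1 := if op == 0 then st.1 ++ [0] else st.1 ++ [(PySem.List.pyGet? st.1 (-1)).getD 0]
  let xs2 := xs1 ++ [(PySem.List.pyGet? xs1 (-1)).getD 0 + 1]
  let v := (PySem.List.pyGet? liveness op).getD 0   -- exact: 0 ≤ op < len(liveness)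
  (xs2, st.2 ++ [v, v])

def getLivenessPoints (liveness : List Int) : List Int × List Int :=
  (PySem.List.pyRange 0 (liveness.length : Int) 1).foldl (pvStepA liveness) ([], [])

-- ===== PORT B =====
-- liveness[i // 2]: .getD 0 is exact since 0 ≤ i//2 < len(liveness)
def getLivenessPoints_alt (liveness : List Int) : List Int × List Int :=
  ((PySem.List.pyRange 0 (2 * (liveness.length : Int)) 1).map
      (fun i => PySem.Int.floordiv (i + 1) 2),
   (PySem.List.pyRange 0 (2 * (liveness.length : Int)) 1).map
      (fun i => (PySem.List.pyGet? liveness (PySem.Int.floordiv i 2)).getD 0))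

-- ===== PRECONDITION & SPEC =====
def Spec_getLivenessPoints (liveness : List Int) (out : List Int × List Int) : Prop := out = getLivenessPoints_alt liveness
instance (liveness : List Int) (out : List Int × List Int) : Decidable (Spec_getLivenessPoints liveness out) := by unfold Spec_getLivenessPoints; infer_instance

-- ===== CLAIM (what is proved, stated in full; the proofs are below) =====
def Claim_equal_getLivenessPoints : Prop := ∀ (liveness : List Int), Dom_getLivenessPoints liveness → Spec_getLivenessPoints liveness (getLivenessPoints liveness)

-- ===== LEMMAS AND PROOFS =====

-- closed forms both ports are reduced to
def pvX (n : Nat) : List Int := (List.range (2 * n)).map (fun k => (((k + 1) / 2 : Nat) : Int))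
def pvY (l : List Int) (n : Nat) : List Int := (List.range (2 * n)).map (fun k => l.getD (k / 2) 0)

theorem pvX_last (m : Nat) : pvX (m + 1) = pvX m ++ [(m : Int), (m + 1 : Int)] := by
  simp [pvX, List.range_succ, show 2 * (m + 1) = 2 * m + 1 + 1 by omega]
  omega

theorem pvY_last (l : List Int) (m : Nat) :
    pvY l (m + 1) = pvY l m ++ [l.getD m 0, l.getD m 0] := by
  have h1 : (2 * m) / 2 = m := by omega
  have h2 : (2 * m + 1) / 2 = m := by omega
  simp [pvY, List.range_succ, show 2 * (m + 1) = 2 * m + 1 + 1 by omega, h1, h2]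

theorem pvX_ends (m : Nat) : ∃ pre, pvX (m + 1) = pre ++ [((m : Int) + 1)] := by
  refine ⟨pvX m ++ [(m : Int)], ?_⟩
  rw [pvX_last]
  simp

theorem A_inv (l : List Int) (m : Nat) (hm : m ≤ l.length) :
    (PySem.List.pyRange 0 (m : Int) 1).foldl (pvStepA l) ([], []) = (pvX m, pvY l m) := by
  induction m with
  | zero => simp [PySem.List.pyRange_one_eq_nil, pvX, pvY]
  | succ j ih =>
    have hj : j ≤ l.length := by omega
    have hcast : ((j + 1 : Nat) : Int) = (j : Int) + 1 := by push_cast; ring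
    rw [hcast, PySem.List.pyRange_one_succ_right (by positivity), List.foldl_append, ih hj]
    simp only [List.foldl_cons, List.foldl_nil, pvStepA]
    have hv : (PySem.List.pyGet? l ((j : Int))).getD 0 = l.getD j 0 := by
      simp [PySem.List.pyGet?_natCast, List.getD_eq_getElem?_getD]
    cases j with
    | zero =>
      simp [pvX, pvY, PySem.List.pyGet?_neg_one,
            PySem.List.pyGet?_zero, List.getD_eq_getElem?_getD, List.range_succ]
    | succ i =>
      rw [if_neg (by intro h; simp at h; omega)]
      obtain ⟨pre, hpre⟩ := pvX_ends i
      have hic : ((i : Int) + 1) = ((i + 1 : Nat) : Int) := by push_cast; ring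
      rw [hic] at hpre
      rw [hpre]
      simp only [PySem.List.pyGet?_neg_one_append_singleton, Option.getD_some]
      rw [hv, pvX_last (i + 1), pvY_last l (i + 1), hpre]
      simp only [Prod.mk.injEq]
      constructor
      · push_cast
        simp
      · simp

theorem B_closed (l : List Int) :
    getLivenessPoints_alt l = (pvX l.length, pvY l l.length) := by
  unfold getLivenessPoints_alt pvX pvY
  have h2 : (2 * (l.length : Int)) = ((2 * l.length : Nat) : Int) := by push_cast; ring
  rw [h2, PySem.List.pyRange_zero_natCast]
  simp only [List.map_map, Prod.mk.injEq]
  constructor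
  · apply List.map_congr_left
    intro k hk
    simp only [Function.comp_apply]
    rw [PySem.Int.floordiv_eq_ediv_of_pos (by norm_num)]
    omega
  · apply List.map_congr_left
    intro k hk
    simp only [Function.comp_apply]
    rw [PySem.Int.floordiv_eq_ediv_of_pos (by norm_num),
        show ((k : Int)) / 2 = ((k / 2 : Nat) : Int) by omega,
        PySem.List.pyGet?_natCast]
    simp [List.getD_eq_getElem?_getD]

-- ===== VERDICT (by name: the statement is the Claim_ definition above) =====
theorem getLivenessPoints_spec : Claim_equal_getLivenessPoints := by
  intro l _
  unfold Spec_getLivenessPoints getLivenessPoints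
  rw [B_closed, A_inv l l.length le_rfl]
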